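-- pv_equiv track=rewrite | github.com/IvanNolasco/Natural-Language-Processing | retrieve_contexts.py | retrieve_contexts
-- ===== SOURCE A (Python) =====
-- def retrieve_contexts(text, vocabulary, windowSize):
--
--     contextDict={}
--     for w in vocabulary:
--         context=[]
--         for i in range(len(text)):
--             if text[i]==w:
--                 for j in range(i-int(windowSize/2), i): #left context
--                     if j >= 0:
--                         context.append(text[j])
--                 try:
--                     for j in range(i+1, i+(int(windowSize/2)+1)): #right context
--                         context.append(text[j])
--                 except IndexError:
--                     pass
--         contextDict[w]=context
--
--     return contextDict
-- ===== SOURCE B (Python) =====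
-- def retrieve_contexts(text, vocabulary, windowSize):
--     half = windowSize // 2
--     occurrences = {}
--     for i, w in enumerate(text):
--         occurrences.setdefault(w, []).append(i)
--     return {w: [t for i in occurrences.get(w, [])
--                 for t in text[max(0, i - half):i] + text[i + 1:i + 1 + half]]
--             for w in vocabulary}
-- ===== Notes on version B (the rewrite author's own statement) =====
-- stated objective: alternative
-- what changed: Instead of rescanning the whole text once per vocabulary word with hand-written index loops, B makes one enumerate pass that records each word's occurrence positions in a dict and then builds every vocabulary word's context from those positions with window slices; Pre_ restricts to nonnegative window sizes, the task's natural domain (a window size is a count; on negative sizes A returns empty contexts via int() truncation and empty ranges).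
-- outside the precondition, e.g. on retrieve_contexts(['a', 'b', 'c', 'd', 'e'], ['a'], -6): A returns {'a': []}, B returns {'a': ['b', 'c']}
import Mathlib
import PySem

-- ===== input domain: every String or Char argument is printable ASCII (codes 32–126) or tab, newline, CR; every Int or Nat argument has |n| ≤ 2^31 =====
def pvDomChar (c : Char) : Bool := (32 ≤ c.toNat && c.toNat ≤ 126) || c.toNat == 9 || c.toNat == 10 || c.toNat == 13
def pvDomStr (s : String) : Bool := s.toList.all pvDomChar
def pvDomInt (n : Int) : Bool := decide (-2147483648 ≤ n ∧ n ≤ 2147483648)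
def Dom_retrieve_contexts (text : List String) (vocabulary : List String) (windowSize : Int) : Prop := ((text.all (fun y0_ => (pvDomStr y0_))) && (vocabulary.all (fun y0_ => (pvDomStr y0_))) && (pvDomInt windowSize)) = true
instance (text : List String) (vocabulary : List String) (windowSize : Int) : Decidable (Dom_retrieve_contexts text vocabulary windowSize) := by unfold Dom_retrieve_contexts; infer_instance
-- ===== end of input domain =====

-- B replaces A's per-vocabulary-word scan of the whole text by one indexing pass over the text
-- (occurrence positions per word) plus slice-based window extraction; objective: alternative.

-- ===== PORT A =====
-- 'for j in range(i - int(windowSize/2), i): if j >= 0: context.append(text[j])'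
def leftLoop (text : List String) (j stop : Int) (context : List String) : List String :=
  if j < stop then
    leftLoop text (j + 1) stop
      (if 0 ≤ j then
        match PySem.List.pyGet? text j with
        | some x => context ++ [x]
        | none => context   -- unreachable: the loop is only entered with 0 ≤ j < stop = i < len(text)
      else context)
  else context
termination_by (stop - j).toNat
decreasing_by omega

-- 'try: for j in range(i+1, i+(int(windowSize/2)+1)): context.append(text[j]) except IndexError: pass'
def rightLoop (text : List String) (j stop : Int) (context : List String) : List String :=
  if j < stop then
    match PySem.List.pyGet? text j with
    | some x => rightLoop text (j + 1) stop (context ++ [x])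
    | none => context   -- IndexError: the rest of the loop is abandoned
  else context
termination_by (stop - j).toNat
decreasing_by omega

def retrieve_contexts (text : List String) (vocabulary : List String) (windowSize : Int) : List (String × List String) :=
  (vocabulary.foldl (fun contextDict w =>
      let context :=
        (PySem.List.pyRange 0 (PySem.List.len text) 1).foldl (fun context i =>
          if PySem.List.pyGetD text i "" == w then
            rightLoop text (i + 1) (i + (PySem.Int.truncdiv windowSize 2 + 1))
              (leftLoop text (i - PySem.Int.truncdiv windowSize 2) i context)
          else context) []
      contextDict.insert w context) PySem.Dict.empty).items

-- ===== PORT B =====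
-- 'text[max(0, i - half):i] + text[i + 1:i + 1 + half]'
def contextAt (text : List String) (half i : Int) : List String :=
  PySem.List.slice text (some (max 0 (i - half))) (some i) ++
    PySem.List.slice text (some (i + 1)) (some (i + 1 + half))

def retrieve_contexts_alt (text : List String) (vocabulary : List String) (windowSize : Int) : List (String × List String) :=
  let half := PySem.Int.floordiv windowSize 2
  let occurrences :=
    (PySem.List.enumerate text).foldl
      (fun d p => d.modify p.2 [] (· ++ [p.1])) PySem.Dict.empty
  (vocabulary.foldl (fun d w =>
      d.insert w ((occurrences.getD w []).flatMap (contextAt text half))) PySem.Dict.empty).items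

-- ===== PRECONDITION & SPEC =====
-- Pre_ restricts to the task's natural domain of nonnegative window sizes; A accepts negative
-- sizes too (its ranges are then empty, an artefact of int() truncation), but a window size is
-- a count and B's slice arithmetic is written for counts.
def Pre_retrieve_contexts (text : List String) (vocabulary : List String) (windowSize : Int) : Prop :=
  0 ≤ windowSize
instance (text : List String) (vocabulary : List String) (windowSize : Int) : Decidable (Pre_retrieve_contexts text vocabulary windowSize) := by unfold Pre_retrieve_contexts; infer_instance

def pvWitness_retrieve_contexts : List String × List String × Int :=
  (["the", "cat", "sat", "on", "the", "mat"], ["the", "sat"], 2)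

def Spec_retrieve_contexts (text : List String) (vocabulary : List String) (windowSize : Int) (out : List (String × List String)) : Prop := out = retrieve_contexts_alt text vocabulary windowSize
instance (text : List String) (vocabulary : List String) (windowSize : Int) (out : List (String × List String)) : Decidable (Spec_retrieve_contexts text vocabulary windowSize out) := by unfold Spec_retrieve_contexts; infer_instance

-- ===== CLAIM (what is proved, stated in full; the proofs are below) =====
def Claim_equal_retrieve_contexts : Prop := ∀ (text : List String) (vocabulary : List String) (windowSize : Int), Dom_retrieve_contexts text vocabulary windowSize → Pre_retrieve_contexts text vocabulary windowSize → Spec_retrieve_contexts text vocabulary windowSize (retrieve_contexts text vocabulary windowSize)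

-- ===== LEMMAS AND PROOFS =====

-- For 0 ≤ w, A's int(windowSize/2) equals B's windowSize // 2.
lemma truncdiv_two_eq (w : Int) (hw : 0 ≤ w) :
    PySem.Int.truncdiv w 2 = PySem.Int.floordiv w 2 := by
  rw [PySem.Int.floordiv_eq_ediv_of_pos (by norm_num)]
  unfold PySem.Int.truncdiv
  exact Int.tdiv_eq_ediv_of_nonneg hw

lemma leftLoop_eq (text : List String) :
    ∀ (fuel : Nat) (a b : Int) (ctx : List String), (b - a).toNat ≤ fuel →
      0 ≤ b → b ≤ (text.length : Int) →
      leftLoop text a b ctx =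
        ctx ++ (text.drop (max 0 a).toNat).take (b - max 0 a).toNat := by
  intro fuel
  induction fuel with
  | zero =>
    intro a b ctx hf hb hbl
    rw [leftLoop, if_neg (by omega), show (b - max 0 a).toNat = 0 by omega]
    simp
  | succ n ih =>
    intro a b ctx hf hb hbl
    by_cases hab : a < b
    · by_cases ha : 0 ≤ a
      · have hsome := PySem.List.pyGet?_eq_some_getElem (xs := text) ha (by omega)
        rw [leftLoop, if_pos hab, if_pos ha]
        simp only [hsome]
        have ih' := ih (a + 1) b (ctx ++ [text[a.toNat]]) (by omega) hb hbl
        rw [ih']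
        rw [show max 0 (a + 1) = a + 1 by omega, show max 0 a = a by omega]
        rw [List.drop_eq_getElem_cons (l := text) (i := a.toNat) (by omega)]
        rw [show (b - a).toNat = (b - (a + 1)).toNat + 1 by omega, List.take_succ_cons]
        rw [show (a + 1).toNat = a.toNat + 1 by omega]
        simp
      · rw [leftLoop, if_pos hab, if_neg ha]
        have ih' := ih (a + 1) b ctx (by omega) hb hbl
        rw [ih']
        rw [show max 0 (a + 1) = max 0 a by omega]
    · rw [leftLoop, if_neg hab, show (b - max 0 a).toNat = 0 by omega]
      simp

lemma rightLoop_eq (text : List String) :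
    ∀ (fuel : Nat) (a b : Int) (ctx : List String), (b - a).toNat ≤ fuel → 0 ≤ a →
      rightLoop text a b ctx = ctx ++ (text.drop a.toNat).take (b - a).toNat := by
  intro fuel
  induction fuel with
  | zero =>
    intro a b ctx hf ha
    rw [rightLoop, if_neg (by omega), show (b - a).toNat = 0 by omega]
    simp
  | succ n ih =>
    intro a b ctx hf ha
    by_cases hab : a < b
    · by_cases hlen : a < (text.length : Int)
      · have hsome := PySem.List.pyGet?_eq_some_getElem (xs := text) ha hlen
        rw [rightLoop, if_pos hab]
        simp only [hsome]
        have ih' := ih (a + 1) b (ctx ++ [text[a.toNat]]) (by omega) (by omega)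
        rw [ih']
        rw [List.drop_eq_getElem_cons (l := text) (i := a.toNat) (by omega)]
        rw [show (b - a).toNat = (b - (a + 1)).toNat + 1 by omega, List.take_succ_cons]
        rw [show (a + 1).toNat = a.toNat + 1 by omega]
        simp
      · have hnone : PySem.List.pyGet? text a = none := by
          rw [PySem.List.pyGet?_eq_none_iff]
          simp only [PySem.Raise.InRange]
          omega
        rw [rightLoop, if_pos hab]
        simp only [hnone]
        rw [List.drop_eq_nil_of_le (by omega)]
        simp
    · rw [rightLoop, if_neg hab, show (b - a).toNat = 0 by omega]
      simp

-- one occurrence's window: A's two inner loops produce exactly B's window slices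
lemma chunk_eq (text : List String) (half : Int) (hh : 0 ≤ half)
    (k : Nat) (hk : k < text.length) (ctx : List String) :
    rightLoop text ((k : Int) + 1) ((k : Int) + (half + 1))
      (leftLoop text ((k : Int) - half) (k : Int) ctx) =
    ctx ++ contextAt text half (k : Int) := by
  rw [leftLoop_eq text ((k : Int) - ((k : Int) - half)).toNat _ _ _ le_rfl (by omega) (by omega)]
  rw [rightLoop_eq text ((((k : Int) + (half + 1)) - ((k : Int) + 1))).toNat _ _ _ le_rfl (by omega)]
  rw [contextAt]
  rw [PySem.List.slice_toNat text (by omega) (by omega),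
      PySem.List.slice_toNat text (by omega) (by omega)]
  rw [show ((k : Int) - (max 0 ((k : Int) - half))).toNat
        = (k : Int).toNat - (max 0 ((k : Int) - half)).toNat by omega]
  rw [show ((k : Int) + (half + 1) - ((k : Int) + 1)).toNat
        = ((k : Int) + 1 + half).toNat - ((k : Int) + 1).toNat by omega]
  simp [List.append_assoc]

-- A's middle loop for one vocabulary word, as a filter/flatMap over the enumerated text
lemma contextA_eq (text : List String) (half : Int) (hh : 0 ≤ half) (w : String) :
    (PySem.List.pyRange 0 (PySem.List.len text) 1).foldl (fun context i =>
        if PySem.List.pyGetD text i "" == w then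
          rightLoop text (i + 1) (i + (half + 1)) (leftLoop text (i - half) i context)
        else context) [] =
      ((PySem.List.enumerate text).filter (fun p => p.2 == w)).flatMap
        (fun p => contextAt text half p.1) := by
  have h1 : (PySem.List.pyRange 0 (PySem.List.len text) 1).foldl (fun context i =>
        if PySem.List.pyGetD text i "" == w then
          rightLoop text (i + 1) (i + (half + 1)) (leftLoop text (i - half) i context)
        else context) [] =
      (PySem.List.enumerate text).foldl (fun context p =>
        if p.2 == w then
          rightLoop text (p.1 + 1) (p.1 + (half + 1)) (leftLoop text (p.1 - half) p.1 context)
        else context) [] := by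
    rw [PySem.List.enumerate_eq_map_pyRange text "", List.foldl_map]
  rw [h1]
  have hcong := PySem.List.foldl_congr_mem (PySem.List.enumerate text)
      (fun context p =>
        if p.2 == w then
          rightLoop text (p.1 + 1) (p.1 + (half + 1)) (leftLoop text (p.1 - half) p.1 context)
        else context)
      (fun context p => if p.2 == w then context ++ contextAt text half p.1 else context)
      [] ?_
  · rw [hcong]
    rw [PySem.List.foldl_if_eq_foldl_filter (fun p : Int × String => p.2 == w)
        (fun (context : List String) (p : Int × String) => context ++ contextAt text half p.1),
      PySem.List.foldl_append_eq_flatMap, List.nil_append]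
  · intro acc p hp
    obtain ⟨k, hk, rfl⟩ := (PySem.List.mem_enumerate_iff text 0 p).1 hp
    simp only [zero_add]
    split
    · exact chunk_eq text half hh k hk acc
    · rfl

-- B's occurrence dictionary looked up at w gives the positions of w in the text
lemma occ_eq (text : List String) (w : String) :
    (((PySem.List.enumerate text).foldl
        (fun d p => d.modify p.2 [] (· ++ [p.1])) PySem.Dict.empty).getD w []) =
      ((PySem.List.enumerate text).filter (fun p => p.2 == w)).map (fun p => p.1) := by
  have h1 : (PySem.List.enumerate text).foldl
        (fun d p => d.modify p.2 [] (· ++ [p.1])) PySem.Dict.empty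
      = ((PySem.List.enumerate text).map Prod.swap).foldl
        (fun d p => d.modify p.1 [] (· ++ [p.2])) PySem.Dict.empty := by
    rw [List.foldl_map]
    rfl
  rw [h1, PySem.Dict.getD_foldl_modify_append]
  simp only [List.filter_map, List.map_map, PySem.Dict.getD_empty, List.nil_append]
  rfl

-- ===== VERDICT (by name: the statement is the Claim_ definition above) =====
theorem retrieve_contexts_spec : Claim_equal_retrieve_contexts := by
  intro text vocabulary windowSize _hdom hpre
  show retrieve_contexts text vocabulary windowSize = retrieve_contexts_alt text vocabulary windowSize
  simp only [retrieve_contexts, retrieve_contexts_alt]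
  apply congrArg PySem.Dict.items
  apply PySem.List.foldl_congr_mem
  intro acc w _hw
  congr 1
  have hh : 0 ≤ PySem.Int.floordiv windowSize 2 := by
    rw [PySem.Int.floordiv_eq_ediv_of_pos (by norm_num)]
    exact Int.ediv_nonneg hpre (by norm_num)
  rw [truncdiv_two_eq windowSize hpre,
    contextA_eq text (PySem.Int.floordiv windowSize 2) hh w, occ_eq text w,
    List.flatMap_map]
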